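-- pv_equiv track=rewrite | github.com/clarkdowner/hackerrank | geeks_for_geeks/recursion/contest/reach_top_of_stair.py | calculate_stairs
-- ===== SOURCE A (Python) =====
-- STEPS = [1, 2, 3]
--
-- def calculate_stairs(val, stairs=[]):
--     if sum(stairs) == val:
--         return [stairs]
--     elif sum(stairs) > val:
--         return []
--
--     steps = list()
--     for step in STEPS:
--         steps.extend(calculate_stairs(val, stairs + [step]))
--
--     return list(filter(lambda x: len(x) >= 1, steps))
-- ===== SOURCE B (Python) =====
-- def calculate_stairs(val, stairs=[]):
--     def comps(r):
--         if r == 0: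
--             return [[]]
--         return [[step] + c for step in (1, 2, 3) if step <= r
--                 for c in comps(r - step)]
--     return [stairs + c for c in comps(val - sum(stairs))]
-- ===== Notes on version B (the rewrite author's own statement) =====
-- stated objective: alternative
-- what changed: B recurses on the remaining amount with a suffix-building helper comps(r) that prepends steps to compositions of r-step, instead of A's prefix accumulation that re-sums the growing stairs list at every node and filters non-empty results; Pre_ excludes inputs with remaining amount >= 950, where A overflows CPython's recursion limit (RecursionError).
import Mathlib
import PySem

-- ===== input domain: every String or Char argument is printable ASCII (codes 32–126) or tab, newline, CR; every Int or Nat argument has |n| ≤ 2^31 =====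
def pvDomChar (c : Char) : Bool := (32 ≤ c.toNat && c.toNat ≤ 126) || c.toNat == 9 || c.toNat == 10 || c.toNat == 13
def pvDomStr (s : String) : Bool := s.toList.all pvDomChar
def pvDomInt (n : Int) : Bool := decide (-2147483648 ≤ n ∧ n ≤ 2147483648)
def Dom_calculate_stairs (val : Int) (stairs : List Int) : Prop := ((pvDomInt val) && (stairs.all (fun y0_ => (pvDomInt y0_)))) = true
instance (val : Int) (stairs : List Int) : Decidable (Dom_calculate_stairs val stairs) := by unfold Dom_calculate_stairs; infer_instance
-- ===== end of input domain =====

-- B enumerates compositions of the remaining amount by prepending steps to suffixes,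
-- instead of A's prefix accumulation; same output, different decomposition.

-- ===== PORT A =====
def STEPS : List Int := [1, 2, 3]

-- literal port of A; the fuel argument is only a structural-termination guard:
-- (val - stairs.sum).toNat + 1 levels always suffice (each level adds ≥ 1 to the sum)
def calcAFuel : Nat → Int → List Int → List (List Int)
  | 0, _, _ => []
  | fuel+1, val, stairs =>
    if stairs.sum = val then [stairs]
    else if stairs.sum > val then []
    else
      let steps := STEPS.foldl (fun acc step => acc ++ calcAFuel fuel val (stairs ++ [step])) []
      steps.filter (fun x => decide (1 ≤ x.length))

def calculate_stairs (val : Int) (stairs : List Int) : List (List Int) :=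
  calcAFuel ((val - stairs.sum).toNat + 1) val stairs

-- ===== PORT B =====
-- compsFuel fuel r = all ordered {1,2,3}-compositions of r (Source B's inner helper comps;
-- fuel is only a structural-termination guard, r.toNat + 1 levels always suffice)
def compsFuel : Nat → Int → List (List Int)
  | 0, _ => []
  | fuel+1, r =>
    if r = 0 then [[]]
    else ([1, 2, 3] : List Int).flatMap
      (fun step => if step ≤ r then (compsFuel fuel (r - step)).map (fun c => step :: c) else [])

def comps (r : Int) : List (List Int) := compsFuel (r.toNat + 1) r

def calculate_stairs_alt (val : Int) (stairs : List Int) : List (List Int) :=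
  (comps (val - stairs.sum)).map (fun c => stairs ++ c)

-- ===== PRECONDITION & SPEC =====
-- Pre_ excludes inputs whose remaining amount val - sum(stairs) is at least 950: there A's
-- recursion descends to depth = remaining amount and overflows CPython's default recursion
-- limit, raising RecursionError (observed at remaining = 998; 950 leaves margin for harness
-- stack frames — no excluded input is observed to return).
def Pre_calculate_stairs (val : Int) (stairs : List Int) : Prop := val - stairs.sum < 950
instance (val : Int) (stairs : List Int) : Decidable (Pre_calculate_stairs val stairs) := by unfold Pre_calculate_stairs; infer_instance
def pvWitness_calculate_stairs : Int × List Int := (4, [1])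

def Spec_calculate_stairs (val : Int) (stairs : List Int) (out : List (List Int)) : Prop := out = calculate_stairs_alt val stairs
instance (val : Int) (stairs : List Int) (out : List (List Int)) : Decidable (Spec_calculate_stairs val stairs out) := by unfold Spec_calculate_stairs; infer_instance

-- ===== CLAIM (what is proved, stated in full; the proofs are below) =====
def Claim_equal_calculate_stairs : Prop := ∀ (val : Int) (stairs : List Int), Dom_calculate_stairs val stairs → Pre_calculate_stairs val stairs → Spec_calculate_stairs val stairs (calculate_stairs val stairs)

-- ===== LEMMAS AND PROOFS =====

lemma compsFuel_irrel : ∀ (f1 f2 : Nat) (r : Int), r.toNat < f1 → r.toNat < f2 →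
    compsFuel f1 r = compsFuel f2 r := by
  intro f1
  induction f1 with
  | zero => intro f2 r h1 _; omega
  | succ f1 ih =>
    intro f2 r h1 h2
    match f2 with
    | 0 => omega
    | f2+1 =>
      simp only [compsFuel]
      by_cases hr : r = 0
      · simp [hr]
      · rw [if_neg hr, if_neg hr]
        simp only [List.flatMap_cons, List.flatMap_nil]
        have g : ∀ i : Int, 1 ≤ i →
            (if i ≤ r then (compsFuel f1 (r - i)).map (fun c => i :: c) else [])
              = (if i ≤ r then (compsFuel f2 (r - i)).map (fun c => i :: c) else []) := by
          intro i hi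
          by_cases hir : i ≤ r
          · rw [if_pos hir, if_pos hir, ih f2 (r - i) (by omega) (by omega)]
          · rw [if_neg hir, if_neg hir]
        rw [g 1 (by norm_num), g 2 (by norm_num), g 3 (by norm_num)]

lemma comps_neg (r : Int) (hr : r < 0) : comps r = [] := by
  unfold comps compsFuel
  rw [if_neg (by omega : ¬ r = 0)]
  simp only [List.flatMap_cons, List.flatMap_nil]
  rw [if_neg (by omega : ¬ (1:Int) ≤ r), if_neg (by omega : ¬ (2:Int) ≤ r),
      if_neg (by omega : ¬ (3:Int) ≤ r)]
  simp

lemma comps_unfold (r : Int) (hr : 0 < r) :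
    comps r = (if 1 ≤ r then (comps (r-1)).map (fun c => 1 :: c) else [])
      ++ ((if 2 ≤ r then (comps (r-2)).map (fun c => 2 :: c) else [])
      ++ ((if 3 ≤ r then (comps (r-3)).map (fun c => 3 :: c) else [])
      ++ [])) := by
  conv_lhs => unfold comps compsFuel
  rw [if_neg (by omega : ¬ r = 0)]
  simp only [List.flatMap_cons, List.flatMap_nil]
  have g : ∀ i : Int, 1 ≤ i →
      (if i ≤ r then (compsFuel r.toNat (r - i)).map (fun c => i :: c) else [])
        = (if i ≤ r then (compsFuel ((r - i).toNat + 1) (r - i)).map (fun c => i :: c) else []) := by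
    intro i hi
    by_cases hir : i ≤ r
    · rw [if_pos hir, if_pos hir,
        compsFuel_irrel r.toNat ((r - i).toNat + 1) (r - i) (by omega) (by omega)]
    · rw [if_neg hir, if_neg hir]
  rw [g 1 (by norm_num), g 2 (by norm_num), g 3 (by norm_num)]
  rfl

lemma comp_step (stairs : List Int) (r i : Int) (_hi : 1 ≤ i) :
    ((if i ≤ r then (comps (r-i)).map (fun c => i :: c) else []).map (fun c => stairs ++ c))
      = (comps (r-i)).map (fun c => (stairs ++ [i]) ++ c) := by
  by_cases hir : i ≤ r
  · rw [if_pos hir, List.map_map]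
    apply List.map_congr_left
    intro c _
    simp
  · rw [if_neg hir, comps_neg (r-i) (by omega)]
    simp

lemma filter_keep (stairs : List Int) (i : Int) (l : List (List Int)) :
    ((l.map (fun c => (stairs ++ [i]) ++ c)).filter (fun x => decide (1 ≤ x.length)))
      = l.map (fun c => (stairs ++ [i]) ++ c) := by
  apply List.filter_eq_self.mpr
  intro x hx
  rcases List.mem_map.mp hx with ⟨c, _, rfl⟩
  simp
  omega

lemma main_lemma (val : Int) : ∀ (fuel : Nat) (stairs : List Int),
    (val - stairs.sum).toNat < fuel →
    calcAFuel fuel val stairs = (comps (val - stairs.sum)).map (fun c => stairs ++ c) := by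
  intro fuel
  induction fuel with
  | zero => intro stairs h; omega
  | succ fuel ih =>
    intro stairs h
    simp only [calcAFuel]
    by_cases h1 : stairs.sum = val
    · rw [if_pos h1, show val - stairs.sum = 0 by omega]
      unfold comps compsFuel
      simp
    · by_cases h2 : stairs.sum > val
      · rw [if_neg h1, if_pos h2, comps_neg (val - stairs.sum) (by omega)]
        simp
      · have hr : 0 < val - stairs.sum := by omega
        rw [if_neg h1, if_neg h2]
        simp only [STEPS, List.foldl_cons, List.foldl_nil, List.nil_append]
        have e : ∀ i : Int, 1 ≤ i → calcAFuel fuel val (stairs ++ [i])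
            = (comps (val - stairs.sum - i)).map (fun c => (stairs ++ [i]) ++ c) := by
          intro i hi
          rw [ih (stairs ++ [i]) (by simp [List.sum_append]; omega)]
          simp [List.sum_append]
          ring_nf
        rw [e 1 (by norm_num), e 2 (by norm_num), e 3 (by norm_num), comps_unfold (val - stairs.sum) hr]
        rw [List.filter_append, List.filter_append, filter_keep, filter_keep, filter_keep]
        rw [List.map_append, List.map_append, List.map_append]
        rw [comp_step stairs (val - stairs.sum) 1 (by norm_num),
            comp_step stairs (val - stairs.sum) 2 (by norm_num),
            comp_step stairs (val - stairs.sum) 3 (by norm_num)]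
        simp [List.append_assoc]

-- ===== VERDICT (by name: the statement is the Claim_ definition above) =====
theorem calculate_stairs_spec : Claim_equal_calculate_stairs := by
  intro val stairs _ _
  unfold Spec_calculate_stairs calculate_stairs_alt calculate_stairs
  exact main_lemma val ((val - stairs.sum).toNat + 1) stairs (by omega)
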